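-- pv_equiv track=rewrite | github.com/fyefh5/yandex-algos-training | hw1/hw1i.py | can
-- ===== SOURCE A (Python) =====
-- def can(a, b, c, d, e):
--     cond1 = (d >= a, d >= b, d >= c)
--     cond2 = (e >= a, e >= b, e >= c)
--     fits = 0
--     dfit = False
--     efit = False
--     for i in range(3):
--         if cond1[i] or cond2[i]:
--             fits += 1
--         if cond1[i]:
--             dfit = True
--         if cond2[i]:
--             efit = True
--     if fits >= 2 and dfit and efit:
--         return "YES"
--     return "NO"
-- ===== SOURCE B (Python) =====
-- def can(a, b, c, d, e):
--     s0, s1, _s2 = sorted((a, b, c))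
--     if d >= s0 and e >= s0 and (d >= s1 or e >= s1):
--         return "YES"
--     return "NO"
-- ===== Notes on version B (the rewrite author's own statement) =====
-- stated objective: simpler
-- what changed: Replaces A's three-flag accumulating loop (fits counter plus dfit/efit booleans) by sorting the three dimensions once and testing three direct comparisons against the two smallest.
import Mathlib
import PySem

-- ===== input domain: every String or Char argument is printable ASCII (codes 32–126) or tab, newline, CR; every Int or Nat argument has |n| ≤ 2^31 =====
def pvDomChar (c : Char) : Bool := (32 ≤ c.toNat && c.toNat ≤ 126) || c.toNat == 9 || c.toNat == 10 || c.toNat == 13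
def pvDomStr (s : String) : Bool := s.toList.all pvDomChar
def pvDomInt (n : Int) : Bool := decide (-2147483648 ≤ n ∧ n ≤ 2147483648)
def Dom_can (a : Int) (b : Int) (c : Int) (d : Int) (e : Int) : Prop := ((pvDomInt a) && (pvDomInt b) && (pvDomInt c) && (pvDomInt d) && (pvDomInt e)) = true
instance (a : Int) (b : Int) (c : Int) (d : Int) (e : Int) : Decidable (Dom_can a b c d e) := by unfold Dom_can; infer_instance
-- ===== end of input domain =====

-- B replaces A's three-flag counting loop by sorting the three dimensions and making
-- three direct comparisons against the two smallest (objective: simpler).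

-- ===== PORT A =====
def can (a : Int) (b : Int) (c : Int) (d : Int) (e : Int) : String :=
  let cond1 := (decide (d ≥ a), decide (d ≥ b), decide (d ≥ c))
  let cond2 := (decide (e ≥ a), decide (e ≥ b), decide (e ≥ c))
  -- the for-loop over range(3) as a fold over the three (cond1[i], cond2[i]) pairs,
  -- carrying A's state (fits, dfit, efit)
  let st := [(cond1.1, cond2.1), (cond1.2.1, cond2.2.1), (cond1.2.2, cond2.2.2)].foldl
    (fun (s : Int × Bool × Bool) (p : Bool × Bool) =>
      (if p.1 || p.2 then s.1 + 1 else s.1,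
       if p.1 then true else s.2.1,
       if p.2 then true else s.2.2))
    (0, false, false)
  if st.1 ≥ 2 ∧ st.2.1 ∧ st.2.2 then "YES" else "NO"

-- ===== PORT B =====
def can_alt (a : Int) (b : Int) (c : Int) (d : Int) (e : Int) : String :=
  -- s0, s1, _s2 = sorted((a, b, c)); the fallback branch is unreachable (3 elements)
  match PySem.List.sorted [a, b, c] (fun x => x) false with
  | s0 :: s1 :: _ =>
      if d ≥ s0 ∧ e ≥ s0 ∧ (d ≥ s1 ∨ e ≥ s1) then "YES" else "NO"
  | _ => "NO"

-- ===== PRECONDITION & SPEC =====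
def Spec_can (a : Int) (b : Int) (c : Int) (d : Int) (e : Int) (out : String) : Prop := out = can_alt a b c d e
instance (a : Int) (b : Int) (c : Int) (d : Int) (e : Int) (out : String) : Decidable (Spec_can a b c d e out) := by unfold Spec_can; infer_instance

-- ===== CLAIM (what is proved, stated in full; the proofs are below) =====
def Claim_equal_can : Prop := ∀ (a : Int) (b : Int) (c : Int) (d : Int) (e : Int), Dom_can a b c d e → Spec_can a b c d e (can a b c d e)

-- ===== LEMMAS AND PROOFS =====

-- sorting [a, b, c] yields one of the six arrangements, in nondecreasing order
set_option maxHeartbeats 1000000 in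
theorem sorted3 (a b c : Int) :
    ∃ s0 s1 s2, PySem.List.sorted [a, b, c] (fun x => x) false = [s0, s1, s2] ∧
      s0 ≤ s1 ∧ s1 ≤ s2 ∧
      ((s0 = a ∧ s1 = b ∧ s2 = c) ∨ (s0 = a ∧ s1 = c ∧ s2 = b) ∨
       (s0 = b ∧ s1 = a ∧ s2 = c) ∨ (s0 = b ∧ s1 = c ∧ s2 = a) ∨
       (s0 = c ∧ s1 = a ∧ s2 = b) ∨ (s0 = c ∧ s1 = b ∧ s2 = a)) := by
  rcases le_total a b with hab | hab <;> rcases le_total b c with hbc | hbc <;>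
    rcases le_total a c with hac | hac
  · exact ⟨a, b, c, PySem.List.sorted_id_eq_of_perm_of_pairwise _ _ (List.Perm.refl _)
      (by simp [List.pairwise_cons]; omega), hab, hbc, by tauto⟩
  · exact ⟨a, b, c, PySem.List.sorted_id_eq_of_perm_of_pairwise _ _ (List.Perm.refl _)
      (by simp [List.pairwise_cons]; omega), hab, hbc, by tauto⟩
  · exact ⟨a, c, b, PySem.List.sorted_id_eq_of_perm_of_pairwise _ _
      (List.Perm.cons a (List.Perm.swap b c []))
      (by simp [List.pairwise_cons]; omega), hac, hbc, by tauto⟩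
  · exact ⟨c, a, b, PySem.List.sorted_id_eq_of_perm_of_pairwise _ _
      ((List.Perm.swap a c [b]).trans (List.Perm.cons a (List.Perm.swap b c [])))
      (by simp [List.pairwise_cons]; omega), hac, hab, by tauto⟩
  · exact ⟨b, a, c, PySem.List.sorted_id_eq_of_perm_of_pairwise _ _ (List.Perm.swap a b [c])
      (by simp [List.pairwise_cons]; omega), hab, hac, by tauto⟩
  · exact ⟨b, c, a, PySem.List.sorted_id_eq_of_perm_of_pairwise _ _
      ((List.Perm.cons b (List.Perm.swap a c [])).trans (List.Perm.swap a b [c]))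
      (by simp [List.pairwise_cons]; omega), hbc, hac, by tauto⟩
  · exact ⟨c, b, a, PySem.List.sorted_id_eq_of_perm_of_pairwise _ _
      ((List.Perm.swap b c [a]).trans ((List.Perm.cons b (List.Perm.swap a c [])).trans (List.Perm.swap a b [c])))
      (by simp [List.pairwise_cons]; omega), hbc, hab, by tauto⟩
  · exact ⟨c, b, a, PySem.List.sorted_id_eq_of_perm_of_pairwise _ _
      ((List.Perm.swap b c [a]).trans ((List.Perm.cons b (List.Perm.swap a c [])).trans (List.Perm.swap a b [c])))
      (by simp [List.pairwise_cons]; omega), hbc, hab, by tauto⟩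

-- ===== VERDICT (by name: the statement is the Claim_ definition above) =====
set_option maxHeartbeats 4000000 in
theorem can_spec : Claim_equal_can := by
  intro a b c d e _
  unfold Spec_can can can_alt
  obtain ⟨s0, s1, s2, hs, h01, h12, hp⟩ := sorted3 a b c
  rw [hs]
  rcases hp with ⟨h1, h2, h3⟩ | ⟨h1, h2, h3⟩ | ⟨h1, h2, h3⟩ | ⟨h1, h2, h3⟩ | ⟨h1, h2, h3⟩ | ⟨h1, h2, h3⟩ <;>
    subst h1 <;> subst h2 <;> subst h3 <;>
    by_cases g1 : s0 ≤ d <;> by_cases g2 : s1 ≤ d <;> by_cases g3 : s2 ≤ d <;>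
    by_cases g4 : s0 ≤ e <;> by_cases g5 : s1 ≤ e <;> by_cases g6 : s2 ≤ e <;>
    simp [List.foldl, g1, g2, g3, g4, g5, g6] <;> omega
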